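-- pv_equiv track=rewrite | github.com/12no517/MEMORY_AUGUMENTED_AI_ENVIRNMENT | hackathon_ai_env/agents.py | _ordered_conditions
-- ===== SOURCE A (Python) =====
-- HEALTH_PRIORITIES = (
--     "kidney_disease",
--     "gerd_acidity",
--     "hypertension",
--     "heart_condition",
--     "diabetes",
--     "cold_flu",
--     "liver_condition",
--     "thyroid_condition",
--     "pcos",
--     "asthma_allergy",
--     "generic_condition",
-- )
--
-- def _ordered_conditions(conditions: tuple[str, ...]) -> list[str]:
--     ordered: list[str] = []
--     for item in HEALTH_PRIORITIES:
--         if item in conditions: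
--             ordered.append(item)
--     for item in conditions:
--         if item not in ordered:
--             ordered.append(item)
--     return ordered
-- ===== SOURCE B (Python) =====
-- HEALTH_PRIORITIES = (
--     "kidney_disease",
--     "gerd_acidity",
--     "hypertension",
--     "heart_condition",
--     "diabetes",
--     "cold_flu",
--     "liver_condition",
--     "thyroid_condition",
--     "pcos",
--     "asthma_allergy",
--     "generic_condition",
-- )
--
--
-- def _ordered_conditions(conditions: tuple[str, ...]) -> list[str]:
--     rank = {name: i for i, name in enumerate(HEALTH_PRIORITIES)}
--     unique = list(dict.fromkeys(conditions))
--     known = [c for c in unique if c in rank]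
--     unknown = [c for c in unique if c not in rank]
--     return sorted(known, key=lambda c: rank.get(c, len(HEALTH_PRIORITIES))) + unknown
-- ===== Notes on version B (the rewrite author's own statement) =====
-- stated objective: faster
-- what changed: B replaces A's two membership-scanning loops (scan priorities testing membership in conditions, then scan conditions testing membership in the growing output list) by building a rank dictionary once, deduplicating the input with dict.fromkeys, partitioning into known/unknown, and stably sorting the known items by rank.
import Mathlib
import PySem

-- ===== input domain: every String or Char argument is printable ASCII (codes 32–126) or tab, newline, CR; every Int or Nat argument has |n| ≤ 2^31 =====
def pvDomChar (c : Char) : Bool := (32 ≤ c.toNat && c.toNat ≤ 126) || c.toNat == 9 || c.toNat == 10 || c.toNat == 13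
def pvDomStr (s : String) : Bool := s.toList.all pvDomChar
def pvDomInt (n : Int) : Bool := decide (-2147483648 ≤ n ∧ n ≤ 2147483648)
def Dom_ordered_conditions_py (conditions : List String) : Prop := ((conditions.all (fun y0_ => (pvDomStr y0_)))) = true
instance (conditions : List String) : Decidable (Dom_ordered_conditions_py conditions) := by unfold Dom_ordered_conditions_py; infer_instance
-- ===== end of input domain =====

-- B builds a rank dictionary, dedupes the input, partitions it and stably sorts the known
-- part by rank, instead of A's two list-membership-scanning loops; objective: faster (hashing removes the inner scans).

-- ===== PORT A =====
def HEALTH_PRIORITIES : List String :=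
  ["kidney_disease", "gerd_acidity", "hypertension", "heart_condition", "diabetes",
   "cold_flu", "liver_condition", "thyroid_condition", "pcos", "asthma_allergy",
   "generic_condition"]

def ordered_conditions_py (conditions : List String) : List String :=
  -- first loop: for item in HEALTH_PRIORITIES: if item in conditions: ordered.append(item)
  let ordered := HEALTH_PRIORITIES.foldl
    (fun acc item => if conditions.contains item then acc ++ [item] else acc) []
  -- second loop: for item in conditions: if item not in ordered: ordered.append(item)
  conditions.foldl (fun acc item => if acc.contains item then acc else acc ++ [item]) ordered

-- ===== PORT B =====
def ordered_conditions_py_alt (conditions : List String) : List String :=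
  -- rank = {name: i for i, name in enumerate(HEALTH_PRIORITIES)}
  let rank : PySem.Dict String Int :=
    (PySem.List.enumerate HEALTH_PRIORITIES).foldl
      (fun d p => PySem.Dict.insert d p.2 p.1) PySem.Dict.empty
  -- unique = list(dict.fromkeys(conditions))
  let unique := PySem.List.dedup conditions
  -- known / unknown partition by 'c in rank'
  let known := unique.filter (fun c => (PySem.Dict.get? rank c).isSome)
  let unknown := unique.filter (fun c => !(PySem.Dict.get? rank c).isSome)
  -- sorted(known, key=lambda c: rank.get(c, len(HEALTH_PRIORITIES))) + unknown
  PySem.List.sorted known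
    (fun c => PySem.Dict.getD rank c (HEALTH_PRIORITIES.length : Int)) ++ unknown

-- ===== PRECONDITION & SPEC =====
def Spec_ordered_conditions_py (conditions : List String) (out : List String) : Prop := out = ordered_conditions_py_alt conditions
instance (conditions : List String) (out : List String) : Decidable (Spec_ordered_conditions_py conditions out) := by unfold Spec_ordered_conditions_py; infer_instance

-- ===== CLAIM (what is proved, stated in full; the proofs are below) =====
def Claim_equal_ordered_conditions_py : Prop := ∀ (conditions : List String), Dom_ordered_conditions_py conditions → Spec_ordered_conditions_py conditions (ordered_conditions_py conditions)

-- ===== LEMMAS AND PROOFS =====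

-- the literal value of B's rank dictionary
theorem rank_eq :
    (PySem.List.enumerate HEALTH_PRIORITIES).foldl
      (fun d p => PySem.Dict.insert d p.2 p.1) PySem.Dict.empty
    = PySem.Dict.mk [("kidney_disease", 0), ("gerd_acidity", 1), ("hypertension", 2),
        ("heart_condition", 3), ("diabetes", 4), ("cold_flu", 5), ("liver_condition", 6),
        ("thyroid_condition", 7), ("pcos", 8), ("asthma_allergy", 9),
        ("generic_condition", 10)] := by rfl

-- membership in B's rank dictionary is membership in HEALTH_PRIORITIES
theorem isSome_get?_rank (c : String) :
    (PySem.Dict.get? ((PySem.List.enumerate HEALTH_PRIORITIES).foldl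
        (fun d p => PySem.Dict.insert d p.2 p.1) PySem.Dict.empty) c).isSome
    = HEALTH_PRIORITIES.contains c := by
  rw [rank_eq]
  simp only [PySem.Dict.get?, Option.isSome_map, HEALTH_PRIORITIES, List.contains_cons,
    List.elem_nil, Bool.or_false]
  simp only [List.isSome_find?, List.any_cons, List.any_nil, Bool.or_false]
  simp only [Bool.beq_comm]

-- A's second loop, run from b ++ u, keeps b and extends u like repeated set-add
theorem second_loop_eq (l : List String) : ∀ (b u : List String),
    l.foldl (fun acc x => if acc.contains x then acc else acc ++ [x]) (b ++ u)
    = b ++ (l.filter (fun x => !b.contains x)).foldl PySem.Set.add u := by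
  induction l with
  | nil => intro b u; simp
  | cons x l ih =>
    intro b u
    simp only [List.foldl_cons]
    by_cases hbx : x ∈ b
    · rw [if_pos (by simp [hbx]), List.filter_cons_of_neg (by simp [hbx])]
      exact ih b u
    · by_cases hux : x ∈ u
      · rw [if_pos (by simp [hux]), List.filter_cons_of_pos (by simp [hbx]), List.foldl_cons,
          show PySem.Set.add u x = u by simp [PySem.Set.add, PySem.Set.contains, hux]]
        exact ih b u
      · rw [if_neg (by simp [hbx, hux]), List.append_assoc,
          List.filter_cons_of_pos (by simp [hbx]), List.foldl_cons,
          show PySem.Set.add u x = u ++ [x] by simp [PySem.Set.add, PySem.Set.contains, hux]]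
        exact ih b (u ++ [x])

-- filtering commutes with building a set by repeated add
theorem filter_foldl_add (p : String → Bool) (l : List String) : ∀ (s : List String),
    (l.foldl PySem.Set.add s).filter p = (l.filter p).foldl PySem.Set.add (s.filter p) := by
  induction l with
  | nil => intro s; simp
  | cons x l ih =>
    intro s
    simp only [List.foldl_cons, List.filter_cons]
    rw [ih (PySem.Set.add s x)]
    by_cases hp : p x = true
    · have key : (PySem.Set.add s x).filter p = PySem.Set.add (s.filter p) x := by
        by_cases hm : x ∈ s
        · have : x ∈ s.filter p := by simp [List.mem_filter, hm, hp]
          simp [PySem.Set.add, PySem.Set.contains, hm, this]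
        · have : x ∉ s.filter p := by simp [List.mem_filter, hm]
          simp [PySem.Set.add, PySem.Set.contains, hm, this, List.filter_append, hp]
      simp [hp, key]
    · have key : (PySem.Set.add s x).filter p = s.filter p := by
        by_cases hm : x ∈ s
        · simp [PySem.Set.add, PySem.Set.contains, hm]
        · simp [PySem.Set.add, PySem.Set.contains, hm, List.filter_append, hp]
      simp [hp, key]

-- Set.ofList commutes with filter
theorem ofList_filter (p : String → Bool) (l : List String) :
    (PySem.Set.ofList l).filter p = PySem.Set.ofList (l.filter p) := by
  have h := filter_foldl_add p l []
  simpa [PySem.Set.ofList_eq_foldl] using h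

-- the priority list carries strictly increasing ranks
theorem HP_pairwise :
    List.Pairwise (fun a b =>
      PySem.Dict.getD ((PySem.List.enumerate HEALTH_PRIORITIES).foldl
          (fun d p => PySem.Dict.insert d p.2 p.1) PySem.Dict.empty) a
          (HEALTH_PRIORITIES.length : Int)
      < PySem.Dict.getD ((PySem.List.enumerate HEALTH_PRIORITIES).foldl
          (fun d p => PySem.Dict.insert d p.2 p.1) PySem.Dict.empty) b
          (HEALTH_PRIORITIES.length : Int)) HEALTH_PRIORITIES := by
  decide

theorem HP_nodup : HEALTH_PRIORITIES.Nodup := by decide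

-- ===== VERDICT (by name: the statement is the Claim_ definition above) =====
theorem ordered_conditions_py_spec : Claim_equal_ordered_conditions_py := by
  intro conditions _
  show ordered_conditions_py conditions = ordered_conditions_py_alt conditions
  unfold ordered_conditions_py ordered_conditions_py_alt
  simp only []
  -- A's first loop is a filter of the priority list
  rw [show (HEALTH_PRIORITIES.foldl
      (fun acc item => if conditions.contains item then acc ++ [item] else acc) [])
      = HEALTH_PRIORITIES.filter (fun item => conditions.contains item) by
    simpa using PySem.List.foldl_append_if (fun item => conditions.contains item)
      (fun x => x) HEALTH_PRIORITIES []]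
  -- A's second loop from (filter ++ []) is filter ++ set-of-the-unknowns
  rw [show HEALTH_PRIORITIES.filter (fun item => conditions.contains item)
      = HEALTH_PRIORITIES.filter (fun item => conditions.contains item) ++ [] by simp,
    second_loop_eq]
  simp only [isSome_get?_rank]
  rw [show PySem.List.dedup conditions = PySem.Set.ofList conditions from rfl]
  congr 1
  · -- the sorted known part is exactly A's priority-filter part
    refine (PySem.List.sorted_eq_of_perm_of_pairwise_lt _ _ _ ?_ ?_).symm
    · rw [List.perm_ext_iff_of_nodup (HP_nodup.filter _)
        ((PySem.Set.nodup_ofList conditions).filter _)]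
      intro a
      simp only [List.mem_filter, PySem.Set.mem_ofList]
      constructor
      · rintro ⟨h1, h2⟩
        exact ⟨by simpa using h2, by simpa using h1⟩
      · rintro ⟨h1, h2⟩
        exact ⟨by simpa using h2, by simpa using h1⟩
    · exact List.Pairwise.filter _ HP_pairwise
  · -- the unknown parts agree
    rw [show (List.foldl PySem.Set.add ([] : List String)
        (List.filter (fun x => !(List.filter (fun item => conditions.contains item) HEALTH_PRIORITIES).contains x) conditions))
      = PySem.Set.ofList (List.filter (fun x => !(List.filter (fun item => conditions.contains item) HEALTH_PRIORITIES).contains x) conditions) from rfl]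
    rw [ofList_filter]
    congr 1
    apply List.filter_congr
    intro x hx
    by_cases hm : x ∈ HEALTH_PRIORITIES <;> simp [List.mem_filter, hm, hx]
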